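-- pv_equiv track=rewrite | github.com/0al-spec/SpecPM | src/specpm/core.py | normalize_intent_mappings
-- ===== SOURCE A (Python) =====
-- def normalize_intent_mappings(mappings: list[dict[str, str]]) -> list[dict[str, str]]:
--     seen: set[tuple[str, str]] = set()
--     normalized: list[dict[str, str]] = []
--     for mapping in mappings:
--         capability_id = mapping.get("capability_id")
--         intent_id = mapping.get("intent_id")
--         if not isinstance(capability_id, str) or not isinstance(intent_id, str):
--             continue
--         key = (intent_id, capability_id)
--         if key in seen:
--             continue
--         seen.add(key)
--         normalized.append({"intent_id": intent_id, "capability_id": capability_id})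
--     return sorted(normalized, key=lambda item: (item["intent_id"], item["capability_id"]))
-- ===== SOURCE B (Python) =====
-- def normalize_intent_mappings(mappings: list[dict[str, str]]) -> list[dict[str, str]]:
--     keys = []
--     for mapping in mappings:
--         intent_id = mapping.get("intent_id")
--         capability_id = mapping.get("capability_id")
--         if isinstance(intent_id, str) and isinstance(capability_id, str):
--             keys.append((intent_id, capability_id))
--     keys.sort()
--     result = []
--     prev = None
--     for key in keys:
--         if key != prev:
--             result.append({"intent_id": key[0], "capability_id": key[1]})
--             prev = key
--     return result
-- ===== Notes on version B (the rewrite author's own statement) =====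
-- stated objective: simpler
-- what changed: Replaces A's first-seen hash-set dedup followed by a final keyed sort with filter-keys, sort the key tuples, then a single adjacent-duplicate-eliminating pass (no `seen` set).
import Mathlib
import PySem

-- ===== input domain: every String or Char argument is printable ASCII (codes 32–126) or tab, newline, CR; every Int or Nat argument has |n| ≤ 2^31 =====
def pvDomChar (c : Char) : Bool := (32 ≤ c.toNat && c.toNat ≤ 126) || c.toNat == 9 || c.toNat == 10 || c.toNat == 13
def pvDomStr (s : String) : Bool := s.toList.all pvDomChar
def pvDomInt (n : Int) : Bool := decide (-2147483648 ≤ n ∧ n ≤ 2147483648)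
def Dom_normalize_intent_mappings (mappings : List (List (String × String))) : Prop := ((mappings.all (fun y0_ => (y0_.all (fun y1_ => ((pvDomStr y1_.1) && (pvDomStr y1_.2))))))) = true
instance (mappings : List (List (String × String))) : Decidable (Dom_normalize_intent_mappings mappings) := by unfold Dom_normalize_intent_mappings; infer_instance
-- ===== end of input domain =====

-- B replaces A's first-seen hash-set dedup followed by a sort with filter → sort → adjacent dedup (objective: simpler, no `seen` set).

-- ===== PORT A =====
-- the loop 'for mapping in mappings' with state (seen, normalized); the final sort key
-- item["intent_id"] / item["capability_id"] is ported as get? ... .getD "" (exact: every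
-- item appended carries both keys, so get? never misses and KeyError is unreachable)
def normalize_intent_mappings (mappings : List (List (String × String))) : List (List (String × String)) :=
  let st := mappings.foldl (fun (st : PySem.Set (String × String) × List (List (String × String))) mapping =>
    let seen := st.1
    let normalized := st.2
    match PySem.Dict.get? (PySem.Dict.mk mapping) "capability_id",
          PySem.Dict.get? (PySem.Dict.mk mapping) "intent_id" with
    | some capability_id, some intent_id =>
        let key := (intent_id, capability_id)
        if PySem.Set.contains seen key then (seen, normalized)
        else (PySem.Set.add seen key,
              normalized ++ [[("intent_id", intent_id), ("capability_id", capability_id)]])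
    | _, _ => (seen, normalized)) (PySem.Set.empty, [])
  PySem.List.sorted2 st.2
    (fun item => (PySem.Dict.get? (PySem.Dict.mk item) "intent_id").getD "")
    (fun item => (PySem.Dict.get? (PySem.Dict.mk item) "capability_id").getD "")

-- ===== PORT B =====
-- B's second loop 'for key in keys: if key != prev: …' with state (prev, result)
def pvBLoop (ks : List (String × String)) (prev : Option (String × String))
    (result : List (List (String × String))) : List (List (String × String)) :=
  match ks with
  | [] => result
  | k :: rest =>
      if some k = prev then pvBLoop rest prev result
      else pvBLoop rest (some k) (result ++ [[("intent_id", k.1), ("capability_id", k.2)]])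

def normalize_intent_mappings_alt (mappings : List (List (String × String))) : List (List (String × String)) :=
  let keys := mappings.filterMap (fun mapping =>
    (PySem.Dict.get? (PySem.Dict.mk mapping) "intent_id").bind (fun intent_id =>
      (PySem.Dict.get? (PySem.Dict.mk mapping) "capability_id").map (fun capability_id =>
        (intent_id, capability_id))))
  let sortedKeys := PySem.List.sorted2 keys (fun k => k.1) (fun k => k.2)  -- keys.sort(): tuples, lexicographic
  pvBLoop sortedKeys none []

-- ===== PRECONDITION & SPEC =====
def Spec_normalize_intent_mappings (mappings : List (List (String × String))) (out : List (List (String × String))) : Prop := out = normalize_intent_mappings_alt mappings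
instance (mappings : List (List (String × String))) (out : List (List (String × String))) : Decidable (Spec_normalize_intent_mappings mappings out) := by unfold Spec_normalize_intent_mappings; infer_instance

-- ===== CLAIM (what is proved, stated in full; the proofs are below) =====
def Claim_equal_normalize_intent_mappings : Prop := ∀ (mappings : List (List (String × String))), Dom_normalize_intent_mappings mappings → Spec_normalize_intent_mappings mappings (normalize_intent_mappings mappings)

-- ===== LEMMAS AND PROOFS =====

-- the key → output-dict constructor both programs share
def pvMkItem (k : String × String) : List (String × String) :=
  [("intent_id", k.1), ("capability_id", k.2)]

-- the key extracted from a mapping (none = filtered out), as A's loop reads it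
def pvKeyOf (mapping : List (String × String)) : Option (String × String) :=
  match PySem.Dict.get? (PySem.Dict.mk mapping) "capability_id",
        PySem.Dict.get? (PySem.Dict.mk mapping) "intent_id" with
  | some c, some i => some (i, c)
  | _, _ => none

-- proof-side shape of B's dedup loop: the key list it keeps
def pvAdj (prev : Option (String × String)) : List (String × String) → List (String × String)
  | [] => []
  | k :: rest => if some k = prev then pvAdj prev rest else k :: pvAdj (some k) rest

theorem pvMkItem_get_intent (k : String × String) :
    PySem.Dict.get? (PySem.Dict.mk (pvMkItem k)) "intent_id" = some k.1 := by
  simp [pvMkItem, PySem.Dict.get?_mk_cons]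

theorem pvMkItem_get_cap (k : String × String) :
    PySem.Dict.get? (PySem.Dict.mk (pvMkItem k)) "capability_id" = some k.2 := by
  simp [pvMkItem, PySem.Dict.get?_mk_cons]

-- B's extraction is A's extraction
theorem pvKeyOf_eq (m : List (String × String)) :
    ((PySem.Dict.get? (PySem.Dict.mk m) "intent_id").bind (fun i =>
      (PySem.Dict.get? (PySem.Dict.mk m) "capability_id").map (fun c => (i, c)))) = pvKeyOf m := by
  unfold pvKeyOf
  cases PySem.Dict.get? (PySem.Dict.mk m) "intent_id" <;>
    cases PySem.Dict.get? (PySem.Dict.mk m) "capability_id" <;> rfl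

-- sorted2 with two keys is sorted with the lexicographic key
theorem pvSorted2_eq_sorted {α : Type} (xs : List α) (k1 k2 : α → String) :
    PySem.List.sorted2 xs k1 k2 = PySem.List.sorted xs (fun a => toLex (k1 a, k2 a)) := by
  rw [PySem.List.sorted_eq_foldl_insertBy]
  have h : (fun a b => decide (k1 a < k1 b) || (!decide (k1 b < k1 a) && decide (k2 a < k2 b)))
      = (fun a b => decide (toLex (k1 a, k2 a) < toLex (k1 b, k2 b))) := by
    funext a b
    apply Bool.eq_iff_iff.mpr
    simp only [Bool.or_eq_true, Bool.and_eq_true, Bool.not_eq_true', decide_eq_true_eq,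
      decide_eq_false_iff_not, Prod.Lex.lt_iff, ofLex_toLex]
    constructor
    · rintro (h | ⟨h1, h2⟩)
      · exact Or.inl h
      · rcases lt_trichotomy (k1 a) (k1 b) with h' | h' | h'
        · exact Or.inl h'
        · exact Or.inr ⟨h', h2⟩
        · exact absurd h' h1
    · rintro (h | ⟨h1, h2⟩)
      · exact Or.inl h
      · exact Or.inr ⟨by rw [h1]; exact lt_irrefl _, h2⟩
  show List.foldl (fun acc x => PySem.List.insertBy (fun a b => decide (k1 a < k1 b) || (!decide (k1 b < k1 a) && decide (k2 a < k2 b))) x acc) [] xs = _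
  rw [h]

-- Set.ofList extended by one element
theorem pvOfList_snoc {α : Type} [BEq α] (xs : List α) (x : α) :
    PySem.Set.ofList (xs ++ [x]) = PySem.Set.add (PySem.Set.ofList xs) x := by
  rw [PySem.Set.ofList_eq_foldl, PySem.Set.ofList_eq_foldl, List.foldl_append]
  rfl

-- one accepted new key: both components of A's state advance by the key
theorem pvStep_eq (ks0 : List (String × String)) (i c : String) :
    (if PySem.Set.contains (PySem.Set.ofList ks0) (i, c)
     then (PySem.Set.ofList ks0, (PySem.Set.ofList ks0).map pvMkItem)
     else (PySem.Set.add (PySem.Set.ofList ks0) (i, c),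
           (PySem.Set.ofList ks0).map pvMkItem ++ [[("intent_id", i), ("capability_id", c)]]))
    = (PySem.Set.ofList (ks0 ++ [(i, c)]), (PySem.Set.ofList (ks0 ++ [(i, c)])).map pvMkItem) := by
  rw [pvOfList_snoc]
  by_cases hmem : PySem.Set.contains (PySem.Set.ofList ks0) (i, c) = true
  · have hadd : PySem.Set.add (PySem.Set.ofList ks0) (i, c) = PySem.Set.ofList ks0 := by
      simp only [PySem.Set.add, hmem, if_true]
    rw [if_pos hmem, hadd]
  · have hadd : PySem.Set.add (PySem.Set.ofList ks0) (i, c) = PySem.Set.ofList ks0 ++ [(i, c)] := by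
      simp only [PySem.Set.add, hmem, if_false, Bool.false_eq_true]
    rw [if_neg hmem, hadd, List.map_append]
    rfl

-- A's loop invariant: seen is Set.ofList of the keys so far, normalized its image under pvMkItem
theorem pvALoop_spec (ms : List (List (String × String))) (ks0 : List (String × String)) :
    ms.foldl (fun (st : PySem.Set (String × String) × List (List (String × String))) mapping =>
      let seen := st.1
      let normalized := st.2
      match PySem.Dict.get? (PySem.Dict.mk mapping) "capability_id",
            PySem.Dict.get? (PySem.Dict.mk mapping) "intent_id" with
      | some capability_id, some intent_id =>
          let key := (intent_id, capability_id)
          if PySem.Set.contains seen key then (seen, normalized)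
          else (PySem.Set.add seen key,
                normalized ++ [[("intent_id", intent_id), ("capability_id", capability_id)]])
      | _, _ => (seen, normalized)) (PySem.Set.ofList ks0, (PySem.Set.ofList ks0).map pvMkItem)
    = (PySem.Set.ofList (ks0 ++ ms.filterMap pvKeyOf),
       (PySem.Set.ofList (ks0 ++ ms.filterMap pvKeyOf)).map pvMkItem) := by
  induction ms generalizing ks0 with
  | nil => simp
  | cons m rest ih =>
    simp only [List.foldl_cons, List.filterMap_cons]
    have hkey : ∀ (r : Option (String × String)), pvKeyOf m = r →
        (match PySem.Dict.get? (PySem.Dict.mk m) "capability_id",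
               PySem.Dict.get? (PySem.Dict.mk m) "intent_id" with
         | some c, some i => some (i, c)
         | _, _ => none) = r := by
      intro r hr; rw [← hr]; rfl
    cases hk : pvKeyOf m with
    | none =>
      have hm := hkey none hk
      cases hc : PySem.Dict.get? (PySem.Dict.mk m) "capability_id" <;>
        cases hi : PySem.Dict.get? (PySem.Dict.mk m) "intent_id" <;>
        simp only [hc, hi] at hm ⊢ <;> try simp only [reduceCtorEq] at hm
      · exact ih ks0
      · exact ih ks0
      · exact ih ks0
    | some k =>
      have hm := hkey (some k) hk
      have hstep : (match PySem.Dict.get? (PySem.Dict.mk m) "capability_id",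
               PySem.Dict.get? (PySem.Dict.mk m) "intent_id" with
         | some capability_id, some intent_id =>
             let key := (intent_id, capability_id)
             if PySem.Set.contains (PySem.Set.ofList ks0) key
             then (PySem.Set.ofList ks0, (PySem.Set.ofList ks0).map pvMkItem)
             else (PySem.Set.add (PySem.Set.ofList ks0) key,
                   (PySem.Set.ofList ks0).map pvMkItem ++ [[("intent_id", intent_id), ("capability_id", capability_id)]])
         | _, _ => (PySem.Set.ofList ks0, (PySem.Set.ofList ks0).map pvMkItem))
          = (PySem.Set.ofList (ks0 ++ [k]), (PySem.Set.ofList (ks0 ++ [k])).map pvMkItem) := by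
        cases hc : PySem.Dict.get? (PySem.Dict.mk m) "capability_id" <;>
          cases hi : PySem.Dict.get? (PySem.Dict.mk m) "intent_id" <;>
          simp only [hc, hi] at hm ⊢ <;> try simp only [reduceCtorEq] at hm
        obtain rfl := Option.some.inj hm
        exact pvStep_eq ks0 _ _
      rw [show (ks0 ++ k :: rest.filterMap pvKeyOf) = (ks0 ++ [k]) ++ rest.filterMap pvKeyOf by simp]
      calc _ = List.foldl _ (PySem.Set.ofList (ks0 ++ [k]), (PySem.Set.ofList (ks0 ++ [k])).map pvMkItem) rest := by
              exact congrArg (List.foldl _ · rest) hstep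
        _ = _ := ih (ks0 ++ [k])

-- B's loop produces pvMkItem-images of the pvAdj-deduped key list
theorem pvBLoop_eq (ks : List (String × String)) (prev : Option (String × String))
    (acc : List (List (String × String))) :
    pvBLoop ks prev acc = acc ++ (pvAdj prev ks).map pvMkItem := by
  induction ks generalizing prev acc with
  | nil => simp [pvBLoop, pvAdj]
  | cons k rest ih =>
    by_cases h : some k = prev
    · simp [pvBLoop, pvAdj, h, ih]
    · simp [pvBLoop, pvAdj, h, ih, pvMkItem]

-- pvAdj on an ascending list: membership and strict ascent
theorem pvAdj_spec (l : List (String × String)) (prev : Option (String × String))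
    (hs : l.Pairwise (fun a b => toLex a ≤ toLex b))
    (hp : ∀ p, prev = some p → ∀ x ∈ l, toLex p ≤ toLex x) :
    (∀ x, x ∈ pvAdj prev l ↔ x ∈ l ∧ some x ≠ prev)
    ∧ (pvAdj prev l).Pairwise (fun a b => toLex a < toLex b) := by
  induction l generalizing prev with
  | nil => simp [pvAdj]
  | cons k rest ih =>
    have hs' := (List.pairwise_cons.mp hs).2
    have hk : ∀ x ∈ rest, toLex k ≤ toLex x := (List.pairwise_cons.mp hs).1
    by_cases h : some k = prev
    · -- k equals the previously appended key: skip it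
      have harg : ∀ q, prev = some q → ∀ x ∈ rest, toLex q ≤ toLex x := by
        intro q hq x hx
        rw [← h] at hq
        cases Option.some.inj hq
        exact hk x hx
      obtain ⟨hmem, hpw⟩ := ih prev hs' harg
      rw [show pvAdj prev (k :: rest) = pvAdj prev rest by rw [pvAdj]; simp [h]]
      refine ⟨fun x => ?_, hpw⟩
      rw [hmem x]
      simp only [List.mem_cons]
      constructor
      · rintro ⟨h1, h2⟩; exact ⟨Or.inr h1, h2⟩
      · rintro ⟨h1 | h1, h2⟩
        · subst h1; exact absurd h h2
        · exact ⟨h1, h2⟩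
    · -- k is new: keep it, it becomes prev
      rw [show pvAdj prev (k :: rest) = k :: pvAdj (some k) rest by rw [pvAdj]; simp [h]]
      have harg : ∀ q, (some k : Option (String × String)) = some q → ∀ x ∈ rest, toLex q ≤ toLex x := by
        intro q hq x hx
        cases Option.some.inj hq
        exact hk x hx
      obtain ⟨hmem, hpw⟩ := ih (some k) hs' harg
      have hlt : ∀ x ∈ pvAdj (some k) rest, toLex k < toLex x := by
        intro x hx
        obtain ⟨hx1, hx2⟩ := (hmem x).mp hx
        refine lt_of_le_of_ne (hk x hx1) ?_
        intro he
        exact hx2 (congrArg some (toLex_inj.mp he)).symm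
      constructor
      · intro x
        rw [List.mem_cons, hmem x]
        constructor
        · rintro (rfl | ⟨h1, h2⟩)
          · exact ⟨List.mem_cons_self, fun hc => h hc⟩
          · refine ⟨List.mem_cons_of_mem _ h1, ?_⟩
            intro hc
            cases hprev : prev with
            | none => rw [hprev] at hc; exact Option.some_ne_none x hc
            | some p =>
              rw [hprev] at hc
              have hpx : x = p := Option.some.inj hc
              have hpk : toLex p ≤ toLex k := hp p hprev k List.mem_cons_self
              have hkx : toLex k < toLex x := hlt x ((hmem x).mpr ⟨h1, h2⟩)
              rw [hpx] at hkx
              exact absurd hpk (not_le.mpr hkx)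
        · rintro ⟨h1, h2⟩
          rcases List.mem_cons.mp h1 with rfl | h1'
          · exact Or.inl rfl
          · by_cases hxk : x = k
            · exact Or.inl hxk
            · exact Or.inr ⟨h1', fun hc => hxk (Option.some.inj hc)⟩
      · exact List.pairwise_cons.mpr ⟨hlt, hpw⟩

-- ===== VERDICT (by name: the statement is the Claim_ definition above) =====
theorem normalize_intent_mappings_spec : Claim_equal_normalize_intent_mappings := by
  intro mappings _
  unfold Spec_normalize_intent_mappings
  -- B computes the pvMkItem-image of the pvAdj-deduped sorted key list
  have hB : normalize_intent_mappings_alt mappings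
      = (pvAdj none (PySem.List.sorted (mappings.filterMap pvKeyOf) (fun k => toLex k))).map pvMkItem := by
    unfold normalize_intent_mappings_alt
    simp only [pvKeyOf_eq, pvBLoop_eq, List.nil_append, pvSorted2_eq_sorted]
  -- A computes the sort (by its item key) of the pvMkItem-image of the deduped key set
  have hA : normalize_intent_mappings mappings
      = PySem.List.sorted ((PySem.Set.ofList (mappings.filterMap pvKeyOf)).map pvMkItem)
          (fun item => toLex ((PySem.Dict.get? (PySem.Dict.mk item) "intent_id").getD "",
                              (PySem.Dict.get? (PySem.Dict.mk item) "capability_id").getD "")) := by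
    unfold normalize_intent_mappings
    simp only []
    rw [pvSorted2_eq_sorted]
    have h := pvALoop_spec mappings []
    rw [List.nil_append] at h
    exact congrArg (fun p : PySem.Set (String × String) × List (List (String × String)) =>
      PySem.List.sorted p.2 (fun item => toLex ((PySem.Dict.get? (PySem.Dict.mk item) "intent_id").getD "",
        (PySem.Dict.get? (PySem.Dict.mk item) "capability_id").getD ""))) h
  rw [hA, hB]
  set ks := mappings.filterMap pvKeyOf with hks
  set l := PySem.List.sorted ks (fun k => toLex k) with hl
  have hsortedle : l.Pairwise (fun a b => toLex a ≤ toLex b) :=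
    PySem.List.sorted_pairwise ks (fun k => toLex k)
  obtain ⟨hmem, hpw⟩ := pvAdj_spec l none hsortedle (fun p hp => nomatch hp)
  -- uniqueness of the strictly ascending arrangement
  apply PySem.List.sorted_eq_of_perm_of_pairwise_lt
  · -- permutation: both sides are nodup with the same members
    apply List.Perm.map
    rw [List.perm_ext_iff_of_nodup _ (PySem.Set.nodup_ofList ks)]
    · intro x
      rw [hmem x, PySem.Set.mem_ofList]
      have hx : x ∈ l ↔ x ∈ ks := PySem.List.mem_sorted ks (fun k => toLex k) false x
      simp [hx]
    · refine List.Pairwise.imp ?_ hpw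
      intro a b hab he
      exact absurd (congrArg toLex he) (ne_of_lt hab)
  · -- strict ascent of the mapped list under A's sort key
    rw [List.pairwise_map]
    apply List.Pairwise.imp _ hpw
    intro a b h
    simpa [pvMkItem_get_intent, pvMkItem_get_cap] using h
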